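-- pv_equiv track=rewrite | github.com/vfeng2023/AI | AI/AI 1/Unit 3/Ultimate Tic Tac Toe/ultimate2.py | getbigBoard
-- ===== SOURCE A (Python) =====
-- def gameOver(board,player):
--     """
--     Returns 1,0,-1 or None
--     1 - I win
--     0 - Draw
--     -1 - Other wins
--     None = incomplete board
--     """
--     # check diagonals, rows and columns. Returns a (bool,int) tuple. bool indicates if game is over, int describes score of board
--     other = "O"
--     if player == "O":
--         other = "X"
--     win = player*3
--     loss = other*3
--
--
--     for row in range(3):
--         if (seq:=board[(row*3):(row+1)*3]) == win:
--             return 1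
--         if seq == loss:
--             return -1
--     for col in range(3):
--         seq = board[col:col+3*3:3]
--         if seq == win:
--             return 1
--         if seq == loss:
--             return -1
--     # check diagonals
--     posDiag = board[0]+board[4]+board[8]
--     negDiag = board[2]+board[4]+board[6]
--
--     if posDiag == win:
--         return 1
--     if posDiag == loss:
--         return -1
--     if negDiag == win:
--         return 1
--     if negDiag == loss:
--         return -1
--     if board.find(".") == -1:
--         return 0
--     # if no board is present, return false
--     return None
--
-- def getbigBoard(board,player):
--     other = "O"
--     if player == "O":
--         other = "X"
--     big_board = "" # <-- status of the large board . = incomplete, ? = draw, X = X won, O = O won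
--     for b in board:
--         status = gameOver(b,player)
--         if status is None:
--             big_board += "."
--         else:
--             if status == 1:
--                 big_board += player
--             elif status == 0:
--                 big_board += "?"
--             else:
--                 big_board += other
--     return big_board
-- ===== SOURCE B (Python) =====
-- WIN_MASKS = (0b000000111, 0b000111000, 0b111000000,
--              0b001001001, 0b010010010, 0b100100100,
--              0b100010001, 0b001010100)
--
-- def getbigBoard(board, player):
--     other = "X" if player == "O" else "O"
--     out = []
--     for b in board:
--         pmask = 0
--         omask = 0
--         for i in range(9):
--             if b[i] == player:
--                 pmask |= 1 << i
--             if b[i] == other: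
--                 omask |= 1 << i
--         ch = None
--         for w in WIN_MASKS:
--             if pmask & w == w:
--                 ch = player
--                 break
--             if omask & w == w:
--                 ch = other
--                 break
--         if ch is None:
--             ch = "." if "." in b else "?"
--         out.append(ch)
--     return "".join(out)
-- ===== Notes on version B (the rewrite author's own statement) =====
-- stated objective: alternative
-- what changed: B represents each sub-board as two 9-bit occupancy bitmasks built in one pass over its cells, and decides each line by an integer mask-superset test (pmask & w == w) against precomputed line masks, instead of A's three differently-shaped string-slicing passes (row slices, step-3 column slices, diagonal concatenations) compared against player*3 strings.
-- outside the precondition, e.g. on getbigBoard([''], ''): A returns '', B raises IndexError; on getbigBoard(['XXXXX'], 'X'): A returns 'X', B raises IndexError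
import Mathlib
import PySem

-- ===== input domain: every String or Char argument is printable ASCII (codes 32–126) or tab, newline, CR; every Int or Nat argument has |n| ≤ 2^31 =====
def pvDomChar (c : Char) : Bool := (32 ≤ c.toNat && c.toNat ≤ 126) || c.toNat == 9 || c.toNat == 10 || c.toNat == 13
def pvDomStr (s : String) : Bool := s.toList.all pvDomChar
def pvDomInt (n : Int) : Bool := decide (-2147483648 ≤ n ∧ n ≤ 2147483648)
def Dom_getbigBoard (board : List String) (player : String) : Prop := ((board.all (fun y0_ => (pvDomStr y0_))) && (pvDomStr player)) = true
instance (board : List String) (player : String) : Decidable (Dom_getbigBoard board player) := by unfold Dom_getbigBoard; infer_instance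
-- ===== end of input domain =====

-- B replaces A's string-slicing line checks with a bitboard: one pass over the 9 cells builds two
-- 9-bit occupancy masks, and each line test becomes an integer mask-superset test (objective: alternative).


-- ===== PORT A =====
-- gameOver's early returns are ported continuation-style: each 'for' loop is a recursion whose
-- fall-through continuation k is the rest of the function; outer 'none' = Python raises IndexError.
def rowLoopA (b win loss : List Char) (rows : List Int) (k : Option (Option Int)) : Option (Option Int) :=
  match rows with
  | [] => k
  | r :: rs =>
    let seq := PySem.List.slice b (some (r * 3)) (some ((r + 1) * 3))
    if seq == win then some (some 1)
    else if seq == loss then some (some (-1))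
    else rowLoopA b win loss rs k

def colLoopA (b win loss : List Char) (cols : List Int) (k : Option (Option Int)) : Option (Option Int) :=
  match cols with
  | [] => k
  | c :: cs =>
    -- board[col:col+3*3:3]; the step is the literal 3 ≠ 0, so slice? is always 'some' and getD's default is unreachable
    let seq := (PySem.List.slice? b (some c) (some (c + 3 * 3)) 3).getD []
    if seq == win then some (some 1)
    else if seq == loss then some (some (-1))
    else colLoopA b win loss cs k

def diagA (b win loss : List Char) : Option (Option Int) :=
  match PySem.List.pyGet? b 0, PySem.List.pyGet? b 4, PySem.List.pyGet? b 8,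
        PySem.List.pyGet? b 2, PySem.List.pyGet? b 6 with
  | some a0, some a4, some a8, some a2, some a6 =>
    let posDiag := [a0, a4, a8]
    let negDiag := [a2, a4, a6]
    if posDiag == win then some (some 1)
    else if posDiag == loss then some (some (-1))
    else if negDiag == win then some (some 1)
    else if negDiag == loss then some (some (-1))
    else if PySem.Chars.find b ['.'] = -1 then some (some 0)
    else some none
  | _, _, _, _, _ => none  -- Python raises IndexError here (cell shorter than 9); outside Pre_

def gameOverA (b player : List Char) : Option (Option Int) :=
  let other := if player == ['O'] then ['X'] else ['O']
  let win := player ++ player ++ player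
  let loss := other ++ other ++ other
  rowLoopA b win loss (PySem.List.pyRange 0 3 1)
    (colLoopA b win loss (PySem.List.pyRange 0 3 1)
      (diagA b win loss))

def getbigBoard (board : List String) (player : String) : String :=
  String.ofList (board.foldl (fun acc bs =>
    match gameOverA bs.toList player.toList with
    | some none => acc ++ ['.']
    | some (some st) =>
      if st == 1 then acc ++ player.toList
      else if st == 0 then acc ++ ['?']
      else acc ++ (if player == "O" then ("X" : String) else "O").toList
    | none => acc  -- Python raises IndexError out of getbigBoard here; outside Pre_
    ) [])

-- ===== PORT B =====
-- bitboard: bit i of a mask ↔ cell i belongs to that side; a line is won iff its 3-bit mask is a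
-- subset of the side's occupancy mask (Int.land = Python's &, Int.lor = |, <<< = << on 0 ≤ i < 9)
def winMasksB : List Int := [7, 56, 448, 73, 146, 292, 273, 84]

def masksB (b p o : List Char) : Option (Int × Int) :=
  (PySem.List.pyRange 0 9 1).foldl (fun acc i =>
    match acc with
    | none => none
    | some (pm, om) =>
      match PySem.List.pyGet? b i with
      | none => none  -- Python B raises IndexError here (cell shorter than 9); outside Pre_
      | some c =>
        some ((if [c] == p then Int.lor pm ((1:Int) <<< i.toNat) else pm),
              (if [c] == o then Int.lor om ((1:Int) <<< i.toNat) else om))) (some (0, 0))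

def scanMasksB (pm om : Int) (player other : String) : List Int → Option String
  | [] => none
  | w :: ws =>
    if Int.land pm w == w then some player
    else if Int.land om w == w then some other
    else scanMasksB pm om player other ws

def cellB (b : List Char) (player other : String) : Option String :=
  match masksB b player.toList other.toList with
  | none => none  -- IndexError; outside Pre_
  | some (pm, om) =>
    match scanMasksB pm om player other winMasksB with
    | some ch => some ch
    | none => some (if PySem.Chars.isIn ['.'] b then "." else "?")

def getbigBoard_alt (board : List String) (player : String) : String :=
  let other : String := if player == "O" then "X" else "O"
  String.ofList (PySem.Chars.join [] (board.map (fun bs =>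
    match cellB bs.toList player other with
    | some ch => ch.toList
    | none => []  -- IndexError in Python B; outside Pre_
    )))

-- ===== PRECONDITION & SPEC =====
-- Pre_ excludes boards containing a cell shorter than 9 characters (not full 3x3 sub-boards):
-- on most such inputs A raises IndexError, and on the exceptional short cells where an early
-- slice match lets A return, B's direct cell indexing raises instead.
def Pre_getbigBoard (board : List String) (player : String) : Prop :=
  ∀ b ∈ board, 9 ≤ b.toList.length
instance (board : List String) (player : String) : Decidable (Pre_getbigBoard board player) := by
  unfold Pre_getbigBoard; infer_instance

def pvWitness_getbigBoard : List String × String := (["XOXOXO.XO", "XXXOO.OO."], "X")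

def Spec_getbigBoard (board : List String) (player : String) (out : String) : Prop := out = getbigBoard_alt board player
instance (board : List String) (player : String) (out : String) : Decidable (Spec_getbigBoard board player out) := by unfold Spec_getbigBoard; infer_instance

-- ===== CLAIM (what is proved, stated in full; the proofs are below) =====
def Claim_equal_getbigBoard : Prop := ∀ (board : List String) (player : String), Dom_getbigBoard board player → Pre_getbigBoard board player → Spec_getbigBoard board player (getbigBoard board player)

-- ===== LEMMAS AND PROOFS =====

-- the mask a cell loop builds, as a function of the nine occupancy booleans
def pvBit (b : Bool) (v m : Int) : Int := if b then Int.lor m v else m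
def pvMaskOf (b0 b1 b2 b3 b4 b5 b6 b7 b8 : Bool) : Int :=
  pvBit b8 256 (pvBit b7 128 (pvBit b6 64 (pvBit b5 32 (pvBit b4 16 (pvBit b3 8 (pvBit b2 4 (pvBit b1 2 (pvBit b0 1 0))))))))

theorem masksB_eval (c0 c1 c2 c3 c4 c5 c6 c7 c8 : Char) (rest p o : List Char) :
  masksB (c0::c1::c2::c3::c4::c5::c6::c7::c8::rest) p o
    = some (pvMaskOf ([c0]==p) ([c1]==p) ([c2]==p) ([c3]==p) ([c4]==p) ([c5]==p) ([c6]==p) ([c7]==p) ([c8]==p),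
            pvMaskOf ([c0]==o) ([c1]==o) ([c2]==o) ([c3]==o) ([c4]==o) ([c5]==o) ([c6]==o) ([c7]==o) ([c8]==o)) := by
  have g0 : PySem.List.pyGet? (c0::c1::c2::c3::c4::c5::c6::c7::c8::rest) 0 = some c0 := by
    rw [show (0:Int) = ((0:Nat):Int) from rfl, PySem.List.pyGet?_ofNat _ 0 (by simp)]; rfl
  have g1 : PySem.List.pyGet? (c0::c1::c2::c3::c4::c5::c6::c7::c8::rest) 1 = some c1 := by
    rw [show (1:Int) = ((1:Nat):Int) from rfl, PySem.List.pyGet?_ofNat _ 1 (by simp)]; rfl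
  have g2 : PySem.List.pyGet? (c0::c1::c2::c3::c4::c5::c6::c7::c8::rest) 2 = some c2 := by
    rw [show (2:Int) = ((2:Nat):Int) from rfl, PySem.List.pyGet?_ofNat _ 2 (by simp)]; rfl
  have g3 : PySem.List.pyGet? (c0::c1::c2::c3::c4::c5::c6::c7::c8::rest) 3 = some c3 := by
    rw [show (3:Int) = ((3:Nat):Int) from rfl, PySem.List.pyGet?_ofNat _ 3 (by simp)]; rfl
  have g4 : PySem.List.pyGet? (c0::c1::c2::c3::c4::c5::c6::c7::c8::rest) 4 = some c4 := by
    rw [show (4:Int) = ((4:Nat):Int) from rfl, PySem.List.pyGet?_ofNat _ 4 (by simp)]; rfl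
  have g5 : PySem.List.pyGet? (c0::c1::c2::c3::c4::c5::c6::c7::c8::rest) 5 = some c5 := by
    rw [show (5:Int) = ((5:Nat):Int) from rfl, PySem.List.pyGet?_ofNat _ 5 (by simp)]; rfl
  have g6 : PySem.List.pyGet? (c0::c1::c2::c3::c4::c5::c6::c7::c8::rest) 6 = some c6 := by
    rw [show (6:Int) = ((6:Nat):Int) from rfl, PySem.List.pyGet?_ofNat _ 6 (by simp)]; rfl
  have g7 : PySem.List.pyGet? (c0::c1::c2::c3::c4::c5::c6::c7::c8::rest) 7 = some c7 := by
    rw [show (7:Int) = ((7:Nat):Int) from rfl, PySem.List.pyGet?_ofNat _ 7 (by simp)]; rfl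
  have g8 : PySem.List.pyGet? (c0::c1::c2::c3::c4::c5::c6::c7::c8::rest) 8 = some c8 := by
    rw [show (8:Int) = ((8:Nat):Int) from rfl, PySem.List.pyGet?_ofNat _ 8 (by simp)]; rfl
  unfold masksB
  rw [show PySem.List.pyRange 0 9 1 = [0,1,2,3,4,5,6,7,8] from by decide]
  simp only [List.foldl_cons, List.foldl_nil, g0, g1, g2, g3, g4, g5, g6, g7, g8]
  simp [pvMaskOf, pvBit,
    show ((1:Int) <<< (0:Nat)) = 1 from by decide,
    show ((1:Int) <<< (1:Nat)) = 2 from by decide,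
    show ((1:Int) <<< (2:Nat)) = 4 from by decide,
    show ((1:Int) <<< (3:Nat)) = 8 from by decide,
    show ((1:Int) <<< (4:Nat)) = 16 from by decide,
    show ((1:Int) <<< (5:Nat)) = 32 from by decide,
    show ((1:Int) <<< (6:Nat)) = 64 from by decide,
    show ((1:Int) <<< (7:Nat)) = 128 from by decide,
    show ((1:Int) <<< (8:Nat)) = 256 from by decide]

-- each mask-superset test reads off exactly the three occupancy bits of its line
theorem mt0 : ∀ b0 b1 b2 b3 b4 b5 b6 b7 b8 : Bool,
  (Int.land (pvMaskOf b0 b1 b2 b3 b4 b5 b6 b7 b8) 7 == 7) = (b0 && b1 && b2) := by decide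
theorem mt1 : ∀ b0 b1 b2 b3 b4 b5 b6 b7 b8 : Bool,
  (Int.land (pvMaskOf b0 b1 b2 b3 b4 b5 b6 b7 b8) 56 == 56) = (b3 && b4 && b5) := by decide
theorem mt2 : ∀ b0 b1 b2 b3 b4 b5 b6 b7 b8 : Bool,
  (Int.land (pvMaskOf b0 b1 b2 b3 b4 b5 b6 b7 b8) 448 == 448) = (b6 && b7 && b8) := by decide
theorem mt3 : ∀ b0 b1 b2 b3 b4 b5 b6 b7 b8 : Bool,
  (Int.land (pvMaskOf b0 b1 b2 b3 b4 b5 b6 b7 b8) 73 == 73) = (b0 && b3 && b6) := by decide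
theorem mt4 : ∀ b0 b1 b2 b3 b4 b5 b6 b7 b8 : Bool,
  (Int.land (pvMaskOf b0 b1 b2 b3 b4 b5 b6 b7 b8) 146 == 146) = (b1 && b4 && b7) := by decide
theorem mt5 : ∀ b0 b1 b2 b3 b4 b5 b6 b7 b8 : Bool,
  (Int.land (pvMaskOf b0 b1 b2 b3 b4 b5 b6 b7 b8) 292 == 292) = (b2 && b5 && b8) := by decide
theorem mt6 : ∀ b0 b1 b2 b3 b4 b5 b6 b7 b8 : Bool,
  (Int.land (pvMaskOf b0 b1 b2 b3 b4 b5 b6 b7 b8) 273 == 273) = (b0 && b4 && b8) := by decide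
theorem mt7 : ∀ b0 b1 b2 b3 b4 b5 b6 b7 b8 : Bool,
  (Int.land (pvMaskOf b0 b1 b2 b3 b4 b5 b6 b7 b8) 84 == 84) = (b2 && b4 && b6) := by decide

-- a 3-char line equals p*3 iff each of its chars equals the string p (true for p of any length)
theorem triple_eq (a b c : Char) (p : List Char) :
  ([a, b, c] = p ++ (p ++ p)) ↔ (([a] = p ∧ [b] = p) ∧ [c] = p) := by
  match p with
  | [] => simp
  | [x] => simp; tauto
  | x :: y :: q =>
    constructor
    · intro h
      have := congrArg List.length h
      simp at this
      omega
    · intro ⟨⟨h, _⟩, _⟩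
      have := congrArg List.length h
      simp at this

theorem toList_eq_O (player : String) : (player.toList = ['O']) = (player = "O") := by
  apply propext
  constructor
  · intro h; exact String.toList_inj.mp (by simpa using h)
  · intro h; simp [h]

theorem ite_other_toList (player : String) :
  (if player = "O" then ("X" : String) else "O").toList = (if player = "O" then ['X'] else ['O']) := by
  split_ifs <;> rfl

set_option maxHeartbeats 3200000 in
-- per-cell: A's slicing passes followed by the status-to-character branch produce exactly
-- B's bitboard cell character
lemma cell_eq (player : String) (b : List Char) (h : 9 ≤ b.length) :
    (match gameOverA b player.toList with
     | some none => ['.']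
     | some (some st) =>
       if st == 1 then player.toList
       else if st == 0 then ['?']
       else (if player == "O" then ("X" : String) else "O").toList
     | none => ([] : List Char))
    = (match cellB b player (if player == "O" then ("X" : String) else "O") with
       | some ch => ch.toList
       | none => []) := by
  rcases b with _|⟨c0,_|⟨c1,_|⟨c2,_|⟨c3,_|⟨c4,_|⟨c5,_|⟨c6,_|⟨c7,_|⟨c8,rest⟩⟩⟩⟩⟩⟩⟩⟩⟩ <;>
    simp only [List.length_nil, List.length_cons] at h <;> try omega
  have hc0 : PySem.List.slice? (c0::c1::c2::c3::c4::c5::c6::c7::c8::rest) (some 0) (some 9) 3 = some [c0, c3, c6] := by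
    rcases rest with _ | ⟨c9, rest⟩
    · simp [PySem.List.slice?, PySem.List.sliceIndices]
      norm_num [List.range_succ, List.filterMap_cons, show Int.toNat 3 = 3 from rfl, show Int.toNat 6 = 6 from rfl]
    · simp [PySem.List.slice?, PySem.List.sliceIndices,
        show ∀ n : ℕ, min (0:ℤ) ((n:ℤ) + 1 + 1 + 1 + 1 + 1 + 1 + 1 + 1 + 1 + 1) = 0 from fun n => by omega,
        show ∀ n : ℕ, min (9:ℤ) ((n:ℤ) + 1 + 1 + 1 + 1 + 1 + 1 + 1 + 1 + 1 + 1) = 9 from fun n => by omega]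
      norm_num [List.range_succ, List.filterMap_cons, show Int.toNat 3 = 3 from rfl, show Int.toNat 6 = 6 from rfl,
        show ∀ n : ℕ, (0:ℤ) ≤ (n:ℤ) + 1 + 1 + 1 + 1 + 1 + 1 + 1 + 1 + 1 from fun n => by omega]
  have hc1 : PySem.List.slice? (c0::c1::c2::c3::c4::c5::c6::c7::c8::rest) (some 1) (some 10) 3 = some [c1, c4, c7] := by
    rcases rest with _ | ⟨c9, rest⟩
    · simp [PySem.List.slice?, PySem.List.sliceIndices]
      norm_num [List.range_succ, List.filterMap_cons, show Int.toNat 4 = 4 from rfl, show Int.toNat 7 = 7 from rfl]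
    · simp [PySem.List.slice?, PySem.List.sliceIndices,
        show ∀ n : ℕ, min (1:ℤ) ((n:ℤ) + 1 + 1 + 1 + 1 + 1 + 1 + 1 + 1 + 1 + 1) = 1 from fun n => by omega,
        show ∀ n : ℕ, min (10:ℤ) ((n:ℤ) + 1 + 1 + 1 + 1 + 1 + 1 + 1 + 1 + 1 + 1) = min (10:ℤ) ((n:ℤ) + 10) from fun n => by omega]
      norm_num [List.range_succ, List.filterMap_cons, show Int.toNat 4 = 4 from rfl, show Int.toNat 7 = 7 from rfl,
        show ∀ n : ℕ, (1:ℤ) < (n:ℤ) + 10 from fun n => by omega,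
        show ∀ n : ℕ, (1:ℤ) ≤ (n:ℤ) + 1 + 1 + 1 + 1 + 1 + 1 + 1 + 1 + 1 from fun n => by omega]
  have hc2 : PySem.List.slice? (c0::c1::c2::c3::c4::c5::c6::c7::c8::rest) (some 2) (some 11) 3 = some [c2, c5, c8] := by
    rcases rest with _ | ⟨c9, rest⟩
    · simp [PySem.List.slice?, PySem.List.sliceIndices]
      norm_num [List.range_succ, List.filterMap_cons, show Int.toNat 2 = 2 from rfl, show Int.toNat 5 = 5 from rfl, show Int.toNat 8 = 8 from rfl]
    · simp [PySem.List.slice?, PySem.List.sliceIndices,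
        show ∀ n : ℕ, min (2:ℤ) ((n:ℤ) + 1 + 1 + 1 + 1 + 1 + 1 + 1 + 1 + 1 + 1) = 2 from fun n => by omega,
        show ∀ n : ℕ, min (11:ℤ) ((n:ℤ) + 1 + 1 + 1 + 1 + 1 + 1 + 1 + 1 + 1 + 1) = min (11:ℤ) ((n:ℤ) + 10) from fun n => by omega,
        show ∀ n : ℕ, ((min (11:ℤ) ((n:ℤ) + 10) - 2 + 3 - 1) / 3).toNat = 3 from fun n => by omega]
      norm_num [List.range_succ, List.filterMap_cons, show Int.toNat 2 = 2 from rfl, show Int.toNat 5 = 5 from rfl, show Int.toNat 8 = 8 from rfl,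
        show ∀ n : ℕ, (2:ℤ) < (n:ℤ) + 10 from fun n => by omega]
  unfold gameOverA cellB
  rw [masksB_eval]
  simp [rowLoopA, colLoopA, diagA, scanMasksB, winMasksB, pysem, hc0, hc1, hc2,
    mt0, mt1, mt2, mt3, mt4, mt5, mt6, mt7, triple_eq, toList_eq_O, ite_other_toList]
  by_cases hw0 : (([c0] = player.toList ∧ [c1] = player.toList) ∧ [c2] = player.toList)
  · simp only [if_pos hw0]; rfl
  simp only [if_neg hw0]
  by_cases hl0 : ((([c0] = if player = "O" then ['X'] else ['O']) ∧ [c1] = if player = "O" then ['X'] else ['O']) ∧ [c2] = if player = "O" then ['X'] else ['O'])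
  · simp only [if_pos hl0]; norm_num [ite_other_toList]
  simp only [if_neg hl0]
  by_cases hw1 : (([c3] = player.toList ∧ [c4] = player.toList) ∧ [c5] = player.toList)
  · simp only [if_pos hw1]; rfl
  simp only [if_neg hw1]
  by_cases hl1 : ((([c3] = if player = "O" then ['X'] else ['O']) ∧ [c4] = if player = "O" then ['X'] else ['O']) ∧ [c5] = if player = "O" then ['X'] else ['O'])
  · simp only [if_pos hl1]; norm_num [ite_other_toList]
  simp only [if_neg hl1]
  by_cases hw2 : (([c6] = player.toList ∧ [c7] = player.toList) ∧ [c8] = player.toList)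
  · simp only [if_pos hw2]; rfl
  simp only [if_neg hw2]
  by_cases hl2 : ((([c6] = if player = "O" then ['X'] else ['O']) ∧ [c7] = if player = "O" then ['X'] else ['O']) ∧ [c8] = if player = "O" then ['X'] else ['O'])
  · simp only [if_pos hl2]; norm_num [ite_other_toList]
  simp only [if_neg hl2]
  by_cases hw3 : (([c0] = player.toList ∧ [c3] = player.toList) ∧ [c6] = player.toList)
  · simp only [if_pos hw3]; rfl
  simp only [if_neg hw3]
  by_cases hl3 : ((([c0] = if player = "O" then ['X'] else ['O']) ∧ [c3] = if player = "O" then ['X'] else ['O']) ∧ [c6] = if player = "O" then ['X'] else ['O'])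
  · simp only [if_pos hl3]; norm_num [ite_other_toList]
  simp only [if_neg hl3]
  by_cases hw4 : (([c1] = player.toList ∧ [c4] = player.toList) ∧ [c7] = player.toList)
  · simp only [if_pos hw4]; rfl
  simp only [if_neg hw4]
  by_cases hl4 : ((([c1] = if player = "O" then ['X'] else ['O']) ∧ [c4] = if player = "O" then ['X'] else ['O']) ∧ [c7] = if player = "O" then ['X'] else ['O'])
  · simp only [if_pos hl4]; norm_num [ite_other_toList]
  simp only [if_neg hl4]
  by_cases hw5 : (([c2] = player.toList ∧ [c5] = player.toList) ∧ [c8] = player.toList)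
  · simp only [if_pos hw5]; rfl
  simp only [if_neg hw5]
  by_cases hl5 : ((([c2] = if player = "O" then ['X'] else ['O']) ∧ [c5] = if player = "O" then ['X'] else ['O']) ∧ [c8] = if player = "O" then ['X'] else ['O'])
  · simp only [if_pos hl5]; norm_num [ite_other_toList]
  simp only [if_neg hl5]
  by_cases hw6 : (([c0] = player.toList ∧ [c4] = player.toList) ∧ [c8] = player.toList)
  · simp only [if_pos hw6]; rfl
  simp only [if_neg hw6]
  by_cases hl6 : ((([c0] = if player = "O" then ['X'] else ['O']) ∧ [c4] = if player = "O" then ['X'] else ['O']) ∧ [c8] = if player = "O" then ['X'] else ['O'])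
  · simp only [if_pos hl6]; norm_num [ite_other_toList]
  simp only [if_neg hl6]
  by_cases hw7 : (([c2] = player.toList ∧ [c4] = player.toList) ∧ [c6] = player.toList)
  · simp only [if_pos hw7]; rfl
  simp only [if_neg hw7]
  by_cases hl7 : ((([c2] = if player = "O" then ['X'] else ['O']) ∧ [c4] = if player = "O" then ['X'] else ['O']) ∧ [c6] = if player = "O" then ['X'] else ['O'])
  · simp only [if_pos hl7]; norm_num [ite_other_toList]
  simp only [if_neg hl7]
  by_cases hd : (['.'] <:+: c0 :: c1 :: c2 :: c3 :: c4 :: c5 :: c6 :: c7 :: c8 :: rest)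
  · simp only [if_pos hd]; rfl
  simp only [if_neg hd]
  rfl

-- the whole accumulator loop of A equals acc ++ B's mapped cells
lemma loop_eq (player : String) (board : List String) (acc : List Char)
    (h : ∀ b ∈ board, 9 ≤ b.toList.length) :
    board.foldl (fun acc bs =>
      match gameOverA bs.toList player.toList with
      | some none => acc ++ ['.']
      | some (some st) =>
        if st == 1 then acc ++ player.toList
        else if st == 0 then acc ++ ['?']
        else acc ++ (if player == "O" then ("X" : String) else "O").toList
      | none => acc) acc
      = acc ++ (board.map (fun bs =>
          match cellB bs.toList player (if player == "O" then ("X" : String) else "O") with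
          | some ch => ch.toList
          | none => [])).flatten := by
  induction board generalizing acc with
  | nil => simp
  | cons b board ih =>
    have hb := cell_eq player b.toList (h b (List.mem_cons_self))
    have hrest : ∀ x ∈ board, 9 ≤ x.toList.length := fun x hx => h x (List.mem_cons_of_mem _ hx)
    simp only [List.foldl_cons, List.map_cons, List.flatten_cons]
    rw [show (match gameOverA b.toList player.toList with
      | some none => acc ++ ['.']
      | some (some st) =>
        if st == 1 then acc ++ player.toList
        else if st == 0 then acc ++ ['?']
        else acc ++ (if player == "O" then ("X" : String) else "O").toList
      | none => acc)
      = acc ++ (match gameOverA b.toList player.toList with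
        | some none => ['.']
        | some (some st) =>
          if st == 1 then player.toList
          else if st == 0 then ['?']
          else (if player == "O" then ("X" : String) else "O").toList
        | none => ([] : List Char)) from by
        rcases gameOverA b.toList player.toList with _ | ⟨_ | st⟩ <;> simp <;> split_ifs <;> simp]
    rw [hb, ih _ hrest]
    simp

lemma join_nil_eq_flatten (ps : List (List Char)) :
    PySem.Chars.join [] ps = ps.flatten := by
  induction ps with
  | nil => simp [PySem.Chars.join_nil]
  | cons p ps ih =>
    rcases ps with _ | ⟨q, ps⟩
    · simp [PySem.Chars.join_singleton]
    · rw [PySem.Chars.join_cons_cons, ih]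
      simp

-- ===== VERDICT (by name: the statement is the Claim_ definition above) =====
theorem getbigBoard_spec : Claim_equal_getbigBoard := by
  intro board player _hdom hpre
  unfold Spec_getbigBoard getbigBoard getbigBoard_alt
  simp only []
  rw [loop_eq player board [] hpre, join_nil_eq_flatten]
  simp
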